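-- pv_equiv track=rewrite | github.com/FlyBase/harvdev-utils | harvdev_utils/char_conversions/sub_sup_sgml_to_html.py | sub_sup_sgml_to_html
-- ===== SOURCE A (Python) =====
-- def sub_sup_sgml_to_html(input_string):
--     """A function to convert FlyBase up/down flags into html sub/superscript flags.
--     e.g. <up>hello</up> -> <sup>hello</sup>
--
--     Args:
--         input_string (str): The string containing FlyBase up/down flags to be converted.
--
--     Returns:
--         str: The same string as the input with the html sub/superscript flags.
--     """
--     sub_dict = {
--         '<down>': '<sub>',
--         '</down>': '</sub>',
--         '<up>': '<sup>',
--         '</up>': '</sup>'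
--     }
--     substitution = input_string
--     for key in sub_dict.keys():
--         substitution = substitution.replace(key, sub_dict[key])
--
--     return substitution
-- ===== SOURCE B (Python) =====
-- def sub_sup_sgml_to_html(input_string):
--     """Single left-to-right scan: at each '<', try the four tags once and emit
--     the HTML replacement; otherwise copy the character. One pass instead of four."""
--     tags = {
--         '<down>': '<sub>',
--         '</down>': '</sub>',
--         '<up>': '<sup>',
--         '</up>': '</sup>'
--     }
--     out = []
--     i = 0
--     n = len(input_string)
--     while i < n:
--         if input_string[i] == '<':
--             for tag, rep in tags.items():
--                 if input_string.startswith(tag, i):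
--                     out.append(rep)
--                     i += len(tag)
--                     break
--             else:
--                 out.append('<')
--                 i += 1
--         else:
--             out.append(input_string[i])
--             i += 1
--     return ''.join(out)
-- ===== Notes on version B (the rewrite author's own statement) =====
-- stated objective: alternative
-- what changed: Replaces A's four sequential full str.replace passes with a single left-to-right scan that matches any of the four tags at each candidate tag start and emits its replacement from a table built once.
import Mathlib
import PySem

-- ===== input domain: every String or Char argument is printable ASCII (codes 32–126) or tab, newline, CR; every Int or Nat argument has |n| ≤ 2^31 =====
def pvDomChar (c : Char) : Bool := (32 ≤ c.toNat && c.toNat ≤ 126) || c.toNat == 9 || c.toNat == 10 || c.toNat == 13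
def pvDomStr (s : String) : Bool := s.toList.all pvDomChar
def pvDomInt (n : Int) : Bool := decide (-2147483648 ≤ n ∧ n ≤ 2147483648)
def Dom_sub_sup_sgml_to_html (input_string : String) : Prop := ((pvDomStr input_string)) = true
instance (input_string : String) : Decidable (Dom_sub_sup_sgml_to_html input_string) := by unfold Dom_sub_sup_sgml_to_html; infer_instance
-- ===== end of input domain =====

-- B replaces A's four sequential str.replace passes with one left-to-right scan over the
-- characters consulting a tag table once per candidate tag start; same return value, no side effects.

-- ===== PORT A =====
def sub_sup_sgml_to_html (input_string : String) : String :=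
  let substitution := input_string
  let substitution := PySem.Str.replace substitution "<down>" "<sub>"
  let substitution := PySem.Str.replace substitution "</down>" "</sub>"
  let substitution := PySem.Str.replace substitution "<up>" "<sup>"
  let substitution := PySem.Str.replace substitution "</up>" "</sup>"
  substitution

-- ===== PORT B =====
-- the four (tag, replacement) pairs of Source B's dict, in its insertion order
def pvTagDown : List Char := ['<','d','o','w','n','>']
def pvRepSub : List Char := ['<','s','u','b','>']
def pvTagDownC : List Char := ['<','/','d','o','w','n','>']
def pvRepSubC : List Char := ['<','/','s','u','b','>']
def pvTagUp : List Char := ['<','u','p','>']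
def pvRepSup : List Char := ['<','s','u','p','>']
def pvTagUpC : List Char := ['<','/','u','p','>']
def pvRepSupC : List Char := ['<','/','s','u','p','>']

-- Source B's while-loop: at a '<' try the four tags in dict order, else copy one character
def pvScan (l : List Char) : List Char :=
  match l with
  | [] => []
  | c :: rest =>
    if c = '<' then
      if pvTagDown.isPrefixOf (c :: rest) then pvRepSub ++ pvScan ((c :: rest).drop 6)
      else if pvTagDownC.isPrefixOf (c :: rest) then pvRepSubC ++ pvScan ((c :: rest).drop 7)
      else if pvTagUp.isPrefixOf (c :: rest) then pvRepSup ++ pvScan ((c :: rest).drop 4)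
      else if pvTagUpC.isPrefixOf (c :: rest) then pvRepSupC ++ pvScan ((c :: rest).drop 5)
      else c :: pvScan rest
    else c :: pvScan rest
termination_by l.length
decreasing_by all_goals (simp; try omega)

def sub_sup_sgml_to_html_alt (input_string : String) : String :=
  String.ofList (pvScan input_string.toList)

-- ===== PRECONDITION & SPEC =====
def Spec_sub_sup_sgml_to_html (input_string : String) (out : String) : Prop := out = sub_sup_sgml_to_html_alt input_string
instance (input_string : String) (out : String) : Decidable (Spec_sub_sup_sgml_to_html input_string out) := by unfold Spec_sub_sup_sgml_to_html; infer_instance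

-- ===== CLAIM (what is proved, stated in full; the proofs are below) =====
def Claim_equal_sub_sup_sgml_to_html : Prop := ∀ (input_string : String), Dom_sub_sup_sgml_to_html input_string → Spec_sub_sup_sgml_to_html input_string (sub_sup_sgml_to_html input_string)

-- ===== LEMMAS AND PROOFS =====

-- A fuel-free model of Python's str.replace on char lists (left-to-right,
-- non-overlapping); bridged below to PySem.Chars.replace for nonempty patterns.
def pvRepl (p r : List Char) (l : List Char) : List Char :=
  match l with
  | [] => []
  | c :: t =>
    if p.isPrefixOf (c :: t) && !p.isEmpty then r ++ pvRepl p r ((c :: t).drop p.length)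
    else c :: pvRepl p r t
termination_by l.length
decreasing_by
  · rename_i h
    simp only [Bool.and_eq_true] at h
    have hp : p ≠ [] := by intro he; subst he; simp at h
    have h1 : 1 ≤ p.length := List.length_pos_iff.mpr hp
    simp only [List.length_drop, List.length_cons]
    omega
  · simp

theorem pvRepl_go_eq (p r : List Char) (hp : p ≠ []) :
    ∀ fuel l acc, l.length ≤ fuel →
      PySem.Chars.replace.go p r fuel l acc = acc.reverse ++ pvRepl p r l := by
  intro fuel
  induction fuel with
  | zero =>
    intro l acc hl
    have : l = [] := List.eq_nil_of_length_eq_zero (Nat.le_zero.mp hl)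
    subst this
    simp [PySem.Chars.replace.go, pvRepl]
  | succ n ih =>
    intro l acc hl
    cases l with
    | nil => simp [PySem.Chars.replace.go, pvRepl]
    | cons c t =>
      rw [PySem.Chars.replace.go]
      by_cases h : p.isPrefixOf (c :: t)
      · have hlen : ((c :: t).drop p.length).length ≤ n := by
          simp only [List.length_drop, List.length_cons]
          have h1 : 1 ≤ p.length := List.length_pos_iff.mpr hp
          simp at hl
          omega
        rw [if_pos h, ih _ _ hlen, pvRepl]
        simp [h, hp]
      · have hlen : t.length ≤ n := by simp at hl; omega
        rw [if_neg h, ih _ _ hlen, pvRepl]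
        simp [h]

theorem pvReplace_eq (p r l : List Char) (hp : p ≠ []) :
    PySem.Chars.replace l p r = pvRepl p r l := by
  rw [PySem.Chars.replace]
  rw [if_neg (by simpa [List.isEmpty_iff] using hp)]
  simpa using pvRepl_go_eq p r hp l.length l [] le_rfl

-- mismatch within the common length ⇒ never a prefix, whatever follows
def pvMis : List Char → List Char → Bool
  | a :: v, b :: w => a != b || pvMis v w
  | _, _ => false

theorem pvMis_not_prefix {v w : List Char} (h : pvMis v w = true) (rest : List Char) :
    ¬ v <+: (w ++ rest) := by
  induction v generalizing w with
  | nil => cases w <;> simp [pvMis] at h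
  | cons a v' ih =>
    cases w with
    | nil => simp [pvMis] at h
    | cons b w' =>
      simp [pvMis] at h
      intro hpre
      rw [List.cons_append] at hpre
      rcases (List.cons_prefix_cons.mp hpre) with ⟨hab, htail⟩
      rcases h with h | h
      · exact h hab
      · exact ih h htail

-- a '<'-free block passes through pvRepl untouched (every tag starts with '<')
theorem pvRepl_passthrough (ptail r : List Char) {w : List Char} (hw : '<' ∉ w)
    (rest : List Char) :
    pvRepl ('<' :: ptail) r (w ++ rest) = w ++ pvRepl ('<' :: ptail) r rest := by
  induction w with
  | nil => simp
  | cons a w' ih =>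
    have ha : a ≠ '<' := by intro h; exact hw (h ▸ List.mem_cons_self ..)
    have hw' : '<' ∉ w' := fun h => hw (List.mem_cons_of_mem _ h)
    rw [List.cons_append, pvRepl]
    rw [if_neg (by
      simp only [Bool.and_eq_true, List.isPrefixOf_iff_prefix]
      rintro ⟨hpre, -⟩
      exact ha (List.cons_prefix_cons.mp hpre).1.symm)]
    rw [ih hw']
    rfl

-- a matched tag is consumed and replaced
theorem pvRepl_match (c : Char) (p' r rest : List Char) :
    pvRepl (c :: p') r ((c :: p') ++ rest) = r ++ pvRepl (c :: p') r rest := by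
  rw [List.cons_append, pvRepl]
  rw [if_pos (by
    simp only [Bool.and_eq_true, List.isPrefixOf_iff_prefix]
    exact ⟨List.cons_prefix_cons.mpr ⟨rfl, ⟨rest, rfl⟩⟩, by simp⟩)]
  congr 1
  simp

-- a mismatching tag skips over '<' :: w when w is '<'-free and pvMis holds
theorem pvRepl_skip (v r w rest : List Char) (hm : pvMis v w = true) (hw : '<' ∉ w) :
    pvRepl ('<' :: v) r (('<' :: w) ++ rest) = ('<' :: w) ++ pvRepl ('<' :: v) r rest := by
  rw [List.cons_append, pvRepl]
  rw [if_neg (by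
    simp only [Bool.and_eq_true, List.isPrefixOf_iff_prefix]
    rintro ⟨hpre, -⟩
    exact pvMis_not_prefix hm rest ((List.cons_prefix_cons.mp hpre).2))]
  rw [pvRepl_passthrough v r hw rest]
  rfl

-- no tag at the head: the '<' is copied
theorem pvRepl_step_no (v r x : List Char) (h : ¬ v <+: x) :
    pvRepl ('<' :: v) r ('<' :: x) = '<' :: pvRepl ('<' :: v) r x := by
  rw [pvRepl]
  rw [if_neg (by
    simp only [Bool.and_eq_true, List.isPrefixOf_iff_prefix]
    rintro ⟨hpre, -⟩
    exact h ((List.cons_prefix_cons.mp hpre).2))]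

-- reflection: a '<'-free string is a prefix of pvRepl's output only if it was one of the input
theorem pvRepl_prefix_reflect (p' r' : List Char) :
    ∀ l (v : List Char), '<' ∉ v → v <+: pvRepl ('<' :: p') ('<' :: r') l → v <+: l := by
  intro l
  induction l using pvRepl.induct ('<' :: p') with
  | case1 => simp [pvRepl]
  | case2 c t h ih =>
    intro v hv hpre
    rw [pvRepl, if_pos h, List.cons_append] at hpre
    cases v with
    | nil => exact List.nil_prefix
    | cons a v' =>
      exact absurd ((List.cons_prefix_cons.mp hpre).1 ▸ List.mem_cons_self ..) hv
  | case3 c t h ih =>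
    intro v hv hpre
    rw [pvRepl, if_neg h] at hpre
    cases v with
    | nil => exact List.nil_prefix
    | cons a v' =>
      rcases List.cons_prefix_cons.mp hpre with ⟨hac, htail⟩
      have hv' : '<' ∉ v' := fun hh => hv (List.mem_cons_of_mem _ hh)
      exact List.cons_prefix_cons.mpr ⟨hac, ih v' hv' htail⟩

-- the composed four-pass pipeline at char level
def pvPipe (l : List Char) : List Char :=
  pvRepl pvTagUpC pvRepSupC (pvRepl pvTagUp pvRepSup
    (pvRepl pvTagDownC pvRepSubC (pvRepl pvTagDown pvRepSub l)))

theorem pvPipe_eq_scan : ∀ l, pvPipe l = pvScan l := by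
  intro l
  induction l using pvScan.induct with
  | case1 => simp [pvPipe, pvRepl, pvScan]
  | case2 t h1 ih =>
    -- '<down>' matched
    obtain ⟨t₁, ht⟩ := List.isPrefixOf_iff_prefix.mp h1
    have hdrop : List.drop 6 ('<' :: t) = t₁ := by rw [← ht]; simp [pvTagDown]
    rw [pvScan, if_pos rfl, if_pos h1, hdrop]
    rw [hdrop] at ih
    rw [← ih, ← ht]
    unfold pvPipe
    rw [show pvRepl pvTagDown pvRepSub (pvTagDown ++ t₁)
          = pvRepSub ++ pvRepl pvTagDown pvRepSub t₁
        from pvRepl_match '<' ['d','o','w','n','>'] pvRepSub t₁]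
    rw [show pvRepl pvTagDownC pvRepSubC (pvRepSub ++ pvRepl pvTagDown pvRepSub t₁)
          = pvRepSub ++ pvRepl pvTagDownC pvRepSubC (pvRepl pvTagDown pvRepSub t₁)
        from pvRepl_skip ['/','d','o','w','n','>'] pvRepSubC ['s','u','b','>'] _ (by decide) (by decide)]
    rw [show pvRepl pvTagUp pvRepSup (pvRepSub ++ pvRepl pvTagDownC pvRepSubC (pvRepl pvTagDown pvRepSub t₁))
          = pvRepSub ++ pvRepl pvTagUp pvRepSup (pvRepl pvTagDownC pvRepSubC (pvRepl pvTagDown pvRepSub t₁))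
        from pvRepl_skip ['u','p','>'] pvRepSup ['s','u','b','>'] _ (by decide) (by decide)]
    rw [show pvRepl pvTagUpC pvRepSupC (pvRepSub ++ pvRepl pvTagUp pvRepSup (pvRepl pvTagDownC pvRepSubC (pvRepl pvTagDown pvRepSub t₁)))
          = pvRepSub ++ pvRepl pvTagUpC pvRepSupC (pvRepl pvTagUp pvRepSup (pvRepl pvTagDownC pvRepSubC (pvRepl pvTagDown pvRepSub t₁)))
        from pvRepl_skip ['/','u','p','>'] pvRepSupC ['s','u','b','>'] _ (by decide) (by decide)]
  | case3 t h1 h2 ih =>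
    -- '</down>' matched
    obtain ⟨t₁, ht⟩ := List.isPrefixOf_iff_prefix.mp h2
    have hdrop : List.drop 7 ('<' :: t) = t₁ := by rw [← ht]; simp [pvTagDownC]
    rw [pvScan, if_pos rfl, if_neg h1, if_pos h2, hdrop]
    rw [hdrop] at ih
    rw [← ih, ← ht]
    unfold pvPipe
    rw [show pvRepl pvTagDown pvRepSub (pvTagDownC ++ t₁)
          = pvTagDownC ++ pvRepl pvTagDown pvRepSub t₁
        from pvRepl_skip ['d','o','w','n','>'] pvRepSub ['/','d','o','w','n','>'] t₁ (by decide) (by decide)]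
    rw [show pvRepl pvTagDownC pvRepSubC (pvTagDownC ++ pvRepl pvTagDown pvRepSub t₁)
          = pvRepSubC ++ pvRepl pvTagDownC pvRepSubC (pvRepl pvTagDown pvRepSub t₁)
        from pvRepl_match '<' ['/','d','o','w','n','>'] pvRepSubC _]
    rw [show pvRepl pvTagUp pvRepSup (pvRepSubC ++ pvRepl pvTagDownC pvRepSubC (pvRepl pvTagDown pvRepSub t₁))
          = pvRepSubC ++ pvRepl pvTagUp pvRepSup (pvRepl pvTagDownC pvRepSubC (pvRepl pvTagDown pvRepSub t₁))
        from pvRepl_skip ['u','p','>'] pvRepSup ['/','s','u','b','>'] _ (by decide) (by decide)]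
    rw [show pvRepl pvTagUpC pvRepSupC (pvRepSubC ++ pvRepl pvTagUp pvRepSup (pvRepl pvTagDownC pvRepSubC (pvRepl pvTagDown pvRepSub t₁)))
          = pvRepSubC ++ pvRepl pvTagUpC pvRepSupC (pvRepl pvTagUp pvRepSup (pvRepl pvTagDownC pvRepSubC (pvRepl pvTagDown pvRepSub t₁)))
        from pvRepl_skip ['/','u','p','>'] pvRepSupC ['/','s','u','b','>'] _ (by decide) (by decide)]
  | case4 t h1 h2 h3 ih =>
    -- '<up>' matched
    obtain ⟨t₁, ht⟩ := List.isPrefixOf_iff_prefix.mp h3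
    have hdrop : List.drop 4 ('<' :: t) = t₁ := by rw [← ht]; simp [pvTagUp]
    rw [pvScan, if_pos rfl, if_neg h1, if_neg h2, if_pos h3, hdrop]
    rw [hdrop] at ih
    rw [← ih, ← ht]
    unfold pvPipe
    rw [show pvRepl pvTagDown pvRepSub (pvTagUp ++ t₁)
          = pvTagUp ++ pvRepl pvTagDown pvRepSub t₁
        from pvRepl_skip ['d','o','w','n','>'] pvRepSub ['u','p','>'] t₁ (by decide) (by decide)]
    rw [show pvRepl pvTagDownC pvRepSubC (pvTagUp ++ pvRepl pvTagDown pvRepSub t₁)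
          = pvTagUp ++ pvRepl pvTagDownC pvRepSubC (pvRepl pvTagDown pvRepSub t₁)
        from pvRepl_skip ['/','d','o','w','n','>'] pvRepSubC ['u','p','>'] _ (by decide) (by decide)]
    rw [show pvRepl pvTagUp pvRepSup (pvTagUp ++ pvRepl pvTagDownC pvRepSubC (pvRepl pvTagDown pvRepSub t₁))
          = pvRepSup ++ pvRepl pvTagUp pvRepSup (pvRepl pvTagDownC pvRepSubC (pvRepl pvTagDown pvRepSub t₁))
        from pvRepl_match '<' ['u','p','>'] pvRepSup _]
    rw [show pvRepl pvTagUpC pvRepSupC (pvRepSup ++ pvRepl pvTagUp pvRepSup (pvRepl pvTagDownC pvRepSubC (pvRepl pvTagDown pvRepSub t₁)))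
          = pvRepSup ++ pvRepl pvTagUpC pvRepSupC (pvRepl pvTagUp pvRepSup (pvRepl pvTagDownC pvRepSubC (pvRepl pvTagDown pvRepSub t₁)))
        from pvRepl_skip ['/','u','p','>'] pvRepSupC ['s','u','p','>'] _ (by decide) (by decide)]
  | case5 t h1 h2 h3 h4 ih =>
    -- '</up>' matched
    obtain ⟨t₁, ht⟩ := List.isPrefixOf_iff_prefix.mp h4
    have hdrop : List.drop 5 ('<' :: t) = t₁ := by rw [← ht]; simp [pvTagUpC]
    rw [pvScan, if_pos rfl, if_neg h1, if_neg h2, if_neg h3, if_pos h4, hdrop]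
    rw [hdrop] at ih
    rw [← ih, ← ht]
    unfold pvPipe
    rw [show pvRepl pvTagDown pvRepSub (pvTagUpC ++ t₁)
          = pvTagUpC ++ pvRepl pvTagDown pvRepSub t₁
        from pvRepl_skip ['d','o','w','n','>'] pvRepSub ['/','u','p','>'] t₁ (by decide) (by decide)]
    rw [show pvRepl pvTagDownC pvRepSubC (pvTagUpC ++ pvRepl pvTagDown pvRepSub t₁)
          = pvTagUpC ++ pvRepl pvTagDownC pvRepSubC (pvRepl pvTagDown pvRepSub t₁)
        from pvRepl_skip ['/','d','o','w','n','>'] pvRepSubC ['/','u','p','>'] _ (by decide) (by decide)]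
    rw [show pvRepl pvTagUp pvRepSup (pvTagUpC ++ pvRepl pvTagDownC pvRepSubC (pvRepl pvTagDown pvRepSub t₁))
          = pvTagUpC ++ pvRepl pvTagUp pvRepSup (pvRepl pvTagDownC pvRepSubC (pvRepl pvTagDown pvRepSub t₁))
        from pvRepl_skip ['u','p','>'] pvRepSup ['/','u','p','>'] _ (by decide) (by decide)]
    rw [show pvRepl pvTagUpC pvRepSupC (pvTagUpC ++ pvRepl pvTagUp pvRepSup (pvRepl pvTagDownC pvRepSubC (pvRepl pvTagDown pvRepSub t₁)))
          = pvRepSupC ++ pvRepl pvTagUpC pvRepSupC (pvRepl pvTagUp pvRepSup (pvRepl pvTagDownC pvRepSubC (pvRepl pvTagDown pvRepSub t₁)))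
        from pvRepl_match '<' ['/','u','p','>'] pvRepSupC _]
  | case6 t h1 h2 h3 h4 ih =>
    -- a lone '<' : no tag matches, the character is copied by every stage
    have n1 : ¬ ['d','o','w','n','>'] <+: t := fun hp =>
      h1 (List.isPrefixOf_iff_prefix.mpr (List.cons_prefix_cons.mpr ⟨rfl, hp⟩))
    have n2 : ¬ ['/','d','o','w','n','>'] <+: t := fun hp =>
      h2 (List.isPrefixOf_iff_prefix.mpr (List.cons_prefix_cons.mpr ⟨rfl, hp⟩))
    have n3 : ¬ ['u','p','>'] <+: t := fun hp =>
      h3 (List.isPrefixOf_iff_prefix.mpr (List.cons_prefix_cons.mpr ⟨rfl, hp⟩))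
    have n4 : ¬ ['/','u','p','>'] <+: t := fun hp =>
      h4 (List.isPrefixOf_iff_prefix.mpr (List.cons_prefix_cons.mpr ⟨rfl, hp⟩))
    rw [pvScan, if_pos rfl, if_neg h1, if_neg h2, if_neg h3, if_neg h4, ← ih]
    unfold pvPipe
    rw [show pvRepl pvTagDown pvRepSub ('<' :: t) = '<' :: pvRepl pvTagDown pvRepSub t
        from pvRepl_step_no ['d','o','w','n','>'] pvRepSub t n1]
    rw [show pvRepl pvTagDownC pvRepSubC ('<' :: pvRepl pvTagDown pvRepSub t)
          = '<' :: pvRepl pvTagDownC pvRepSubC (pvRepl pvTagDown pvRepSub t)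
        from pvRepl_step_no ['/','d','o','w','n','>'] pvRepSubC _ (fun hp =>
          n2 (pvRepl_prefix_reflect ['d','o','w','n','>'] ['s','u','b','>'] t _ (by decide) hp))]
    rw [show pvRepl pvTagUp pvRepSup ('<' :: pvRepl pvTagDownC pvRepSubC (pvRepl pvTagDown pvRepSub t))
          = '<' :: pvRepl pvTagUp pvRepSup (pvRepl pvTagDownC pvRepSubC (pvRepl pvTagDown pvRepSub t))
        from pvRepl_step_no ['u','p','>'] pvRepSup _ (fun hp =>
          n3 (pvRepl_prefix_reflect ['d','o','w','n','>'] ['s','u','b','>'] t _ (by decide)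
            (pvRepl_prefix_reflect ['/','d','o','w','n','>'] ['/','s','u','b','>'] _ _ (by decide) hp)))]
    rw [show pvRepl pvTagUpC pvRepSupC ('<' :: pvRepl pvTagUp pvRepSup (pvRepl pvTagDownC pvRepSubC (pvRepl pvTagDown pvRepSub t)))
          = '<' :: pvRepl pvTagUpC pvRepSupC (pvRepl pvTagUp pvRepSup (pvRepl pvTagDownC pvRepSubC (pvRepl pvTagDown pvRepSub t)))
        from pvRepl_step_no ['/','u','p','>'] pvRepSupC _ (fun hp =>
          n4 (pvRepl_prefix_reflect ['d','o','w','n','>'] ['s','u','b','>'] t _ (by decide)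
            (pvRepl_prefix_reflect ['/','d','o','w','n','>'] ['/','s','u','b','>'] _ _ (by decide)
              (pvRepl_prefix_reflect ['u','p','>'] ['s','u','p','>'] _ _ (by decide) hp))))]
  | case7 c t hc ih =>
    rw [pvScan, if_neg hc, ← ih]
    have hw : '<' ∉ [c] := by simpa using fun h => hc h.symm
    unfold pvPipe
    rw [show pvRepl pvTagDown pvRepSub (c :: t) = c :: pvRepl pvTagDown pvRepSub t
        from pvRepl_passthrough ['d','o','w','n','>'] pvRepSub hw t]
    rw [show pvRepl pvTagDownC pvRepSubC (c :: pvRepl pvTagDown pvRepSub t)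
          = c :: pvRepl pvTagDownC pvRepSubC (pvRepl pvTagDown pvRepSub t)
        from pvRepl_passthrough ['/','d','o','w','n','>'] pvRepSubC hw _]
    rw [show pvRepl pvTagUp pvRepSup (c :: pvRepl pvTagDownC pvRepSubC (pvRepl pvTagDown pvRepSub t))
          = c :: pvRepl pvTagUp pvRepSup (pvRepl pvTagDownC pvRepSubC (pvRepl pvTagDown pvRepSub t))
        from pvRepl_passthrough ['u','p','>'] pvRepSup hw _]
    rw [show pvRepl pvTagUpC pvRepSupC (c :: pvRepl pvTagUp pvRepSup (pvRepl pvTagDownC pvRepSubC (pvRepl pvTagDown pvRepSub t)))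
          = c :: pvRepl pvTagUpC pvRepSupC (pvRepl pvTagUp pvRepSup (pvRepl pvTagDownC pvRepSubC (pvRepl pvTagDown pvRepSub t)))
        from pvRepl_passthrough ['/','u','p','>'] pvRepSupC hw _]

-- ===== VERDICT (by name: the statement is the Claim_ definition above) =====
theorem sub_sup_sgml_to_html_spec : Claim_equal_sub_sup_sgml_to_html := by
  intro s _
  unfold Spec_sub_sup_sgml_to_html sub_sup_sgml_to_html sub_sup_sgml_to_html_alt
  show PySem.Str.replace (PySem.Str.replace (PySem.Str.replace (PySem.Str.replace s "<down>" "<sub>")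
      "</down>" "</sub>") "<up>" "<sup>") "</up>" "</sup>" = String.ofList (pvScan s.toList)
  simp only [PySem.Str.replace, String.toList_ofList]
  congr 1
  rw [pvReplace_eq _ _ _ (by decide), pvReplace_eq _ _ _ (by decide),
      pvReplace_eq _ _ _ (by decide), pvReplace_eq _ _ _ (by decide)]
  rw [← pvPipe_eq_scan]
  rfl
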